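-- pv_equiv track=rewrite | github.com/Abiy-Alemu/Abiy-Alemu | Codeforces/D_Calculate_Arrays.py | calculate_array
-- ===== SOURCE A (Python) =====
-- def calculate_array(n, b):
--     a = []
--     x = 0
--
--     for i in range(n):
--         ai = b[i] + x
--         a.append(ai)
--         x = max(x, ai)
--
--     return a
-- ===== SOURCE B (Python) =====
-- def calculate_array(n, b):
--     # Running max equals a prefix sum of positive parts: max(x, b[i]+x) = x + max(0, b[i]).
--     # Pass 1: prefix sums p[i] = sum of max(0, b[j]) for j < i.  Pass 2: a[i] = b[i] + p[i].
--     p = []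
--     s = 0
--     for i in range(n):
--         p.append(s)
--         s += max(0, b[i])
--     return [b[i] + p[i] for i in range(n)]
-- ===== Notes on version B (the rewrite author's own statement) =====
-- stated objective: alternative
-- what changed: Replaces the single pass that maintains a running maximum with two passes: a prefix-sum array of the clamped-positive values max(0,b[j]) built first, then a comprehension a[i] = b[i] + p[i], using the identity max(x, b[i]+x) = x + max(0, b[i]).
import Mathlib
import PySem

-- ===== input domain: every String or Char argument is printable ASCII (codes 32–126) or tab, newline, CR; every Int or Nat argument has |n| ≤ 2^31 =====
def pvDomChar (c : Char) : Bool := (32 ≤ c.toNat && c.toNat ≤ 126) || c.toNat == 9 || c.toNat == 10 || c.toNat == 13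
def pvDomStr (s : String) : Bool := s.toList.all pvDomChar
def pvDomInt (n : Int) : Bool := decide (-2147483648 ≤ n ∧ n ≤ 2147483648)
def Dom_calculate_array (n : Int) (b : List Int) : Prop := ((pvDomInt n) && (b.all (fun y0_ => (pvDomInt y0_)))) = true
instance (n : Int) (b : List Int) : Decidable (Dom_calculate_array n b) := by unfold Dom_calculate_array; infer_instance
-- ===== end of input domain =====

-- B replaces the running-maximum scan by a prefix sum of clamped-positive values plus a second
-- pass (alternative decomposition, same cost). Equivalence on the return value.

-- ===== PORT A =====
-- b[i] would raise IndexError for i ≥ len(b); Pre_ requires n ≤ len(b), so the default 0 is never used.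
def calculate_array (n : Int) (b : List Int) : List Int :=
  ((PySem.List.pyRange 0 n 1).foldl
    (fun (st : List Int × Int) i =>
      let ai := PySem.List.pyGetD b i 0 + st.2
      (st.1 ++ [ai], max st.2 ai))
    ([], 0)).1

-- ===== PORT B =====
-- pass 1: prefix sums p (and running sum s) of max(0, b[i]); pass 2: comprehension b[i] + p[i].
def calculate_array_alt (n : Int) (b : List Int) : List Int :=
  let ps := (PySem.List.pyRange 0 n 1).foldl
    (fun (st : List Int × Int) i =>
      (st.1 ++ [st.2], st.2 + max 0 (PySem.List.pyGetD b i 0)))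
    ([], 0)
  (PySem.List.pyRange 0 n 1).map
    (fun i => PySem.List.pyGetD b i 0 + PySem.List.pyGetD ps.1 i 0)

-- ===== PRECONDITION & SPEC =====
-- Pre_ excludes exactly the inputs where Python's b[i] raises IndexError: n > len(b).
def Pre_calculate_array (n : Int) (b : List Int) : Prop := n ≤ (b.length : Int)
instance (n : Int) (b : List Int) : Decidable (Pre_calculate_array n b) := by
  unfold Pre_calculate_array; infer_instance

def pvWitness_calculate_array : Int × List Int := (3, [2, -5, 4])

def Spec_calculate_array (n : Int) (b : List Int) (out : List Int) : Prop := out = calculate_array_alt n b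
instance (n : Int) (b : List Int) (out : List Int) : Decidable (Spec_calculate_array n b out) := by unfold Spec_calculate_array; infer_instance

-- ===== CLAIM (what is proved, stated in full; the proofs are below) =====
def Claim_equal_calculate_array : Prop := ∀ (n : Int) (b : List Int), Dom_calculate_array n b → Pre_calculate_array n b → Spec_calculate_array n b (calculate_array n b)

-- ===== LEMMAS AND PROOFS =====

-- prefix sum of clamped-positive values of the first k elements
def pvS (b : List Int) (k : Nat) : Int := ((b.take k).map (fun x => max 0 x)).sum

theorem pvS_succ (b : List Int) (k : Nat) (hk : k < b.length) :
    pvS b (k + 1) = pvS b k + max 0 b[k] := by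
  unfold pvS
  rw [List.map_take, List.map_take,
      List.sum_take_succ (b.map (fun x => max 0 x)) k (by simpa using hk)]
  simp

-- A's fold over range k produces (map of b[j] + pvS j, running max = pvS k)
theorem pvFoldA (b : List Int) (k : Nat) (hk : k ≤ b.length) :
    (List.foldl
      (fun (st : List Int × Int) (j : Nat) =>
        (st.1 ++ [b[j]! + st.2], max st.2 (b[j]! + st.2)))
      ([], 0) (List.range k))
    = ((List.range k).map (fun j => b[j]! + pvS b j), pvS b k) := by
  induction k with
  | zero => simp [pvS]
  | succ k ih =>
    have hk' : k < b.length := hk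
    rw [List.range_succ, List.foldl_append, ih (le_of_lt hk')]
    simp only [List.foldl_cons, List.foldl_nil, List.map_append, List.map_cons, List.map_nil,
      Prod.mk.injEq]
    refine ⟨trivial, ?_⟩
    have hb : b[k]! = b[k] := getElem!_pos b k hk'
    rw [pvS_succ b k hk', hb]
    omega

-- B's first fold over range k produces (prefix sums = map of pvS, running sum = pvS k)
theorem pvFoldB (b : List Int) (k : Nat) (hk : k ≤ b.length) :
    (List.foldl
      (fun (st : List Int × Int) (j : Nat) =>
        (st.1 ++ [st.2], st.2 + max 0 b[j]!))
      ([], 0) (List.range k))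
    = ((List.range k).map (pvS b), pvS b k) := by
  induction k with
  | zero => simp [pvS]
  | succ k ih =>
    have hk' : k < b.length := hk
    rw [List.range_succ, List.foldl_append, ih (le_of_lt hk')]
    simp only [List.foldl_cons, List.foldl_nil, List.map_append, List.map_cons, List.map_nil,
      Prod.mk.injEq]
    refine ⟨trivial, ?_⟩
    rw [pvS_succ b k hk', getElem!_pos b k hk']

theorem pvMain (n : Int) (b : List Int) (hpre : n ≤ (b.length : Int)) :
    calculate_array n b = calculate_array_alt n b := by
  unfold calculate_array calculate_array_alt
  have hk : n.toNat ≤ b.length := by omega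
  rw [PySem.List.pyRange_one]
  simp only [sub_zero, List.foldl_map, List.map_map, zero_add]
  have hget : ∀ j ∈ List.range n.toNat,
      PySem.List.pyGetD b (j : Int) 0 = b[j]! := by
    intro j hj
    rw [PySem.List.pyGetD_natCast]
    exact (List.getD_eq_getElem b 0 (lt_of_lt_of_le (List.mem_range.mp hj) hk)).trans
      (getElem!_pos b j (lt_of_lt_of_le (List.mem_range.mp hj) hk)).symm
  rw [PySem.List.foldl_congr_mem (List.range n.toNat) _
        (fun (st : List Int × Int) (j : Nat) =>
          (st.1 ++ [b[j]! + st.2], max st.2 (b[j]! + st.2)))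
        ([], 0)
        (fun st j hj => by rw [hget j hj]),
      pvFoldA b n.toNat hk,
      PySem.List.foldl_congr_mem (List.range n.toNat) _
        (fun (st : List Int × Int) (j : Nat) =>
          (st.1 ++ [st.2], st.2 + max 0 b[j]!))
        ([], 0)
        (fun st j hj => by rw [hget j hj]),
      pvFoldB b n.toNat hk]
  apply List.map_congr_left
  intro j hj
  have hjk : j < n.toNat := List.mem_range.mp hj
  rw [Function.comp_apply, hget j hj, PySem.List.pyGetD_natCast]
  rw [List.getD_eq_getElem _ 0 (by simpa using hjk)]
  simp

-- ===== VERDICT (by name: the statement is the Claim_ definition above) =====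
theorem calculate_array_spec : Claim_equal_calculate_array := by
  intro n b _ hpre
  exact pvMain n b hpre
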